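-- pv_equiv track=rewrite | github.com/Adracir/migration_im_bundestag | experiment.py | skip_some_expected_vals_for_line_plots
-- ===== SOURCE A (Python) =====
-- def skip_some_expected_vals_for_line_plots(x, y, val_to_skip=1000):
--     """
--     handle unavailable values in expected values in order to plot them at the right position in the line plot
--     :param x: x-values including the values that should be skipped, e.g. [1, 2, 3, 4, 5, 6]
--     :param y: y-values including the values that should be skipped, e.g. [1000, 3, 4, 1000, 6, 1000]
--     :param val_to_skip: value that should be skipped, default 1000
--     :return: nested lists for the x and y-values, leaving out the defined values,
--     e.g. x: [[[2, 3], [5]], y: [[3, 4], [6]]]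
--     """
--     x_segments = []
--     y_segments = []
--     current_segment_x = []
--     current_segment_y = []
--     for xi, yi in zip(x, y):
--         if yi != val_to_skip:
--             current_segment_x.append(xi)
--             current_segment_y.append(yi)
--         else:
--             if current_segment_x:
--                 x_segments.append(current_segment_x)
--                 y_segments.append(current_segment_y)
--             current_segment_x = []
--             current_segment_y = []
--     if current_segment_x:
--         x_segments.append(current_segment_x)
--         y_segments.append(current_segment_y)
--     return [x_segments, y_segments]
-- ===== SOURCE B (Python) =====
-- def skip_some_expected_vals_for_line_plots(x, y, val_to_skip=1000):
--     n = min(len(x), len(y))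
--     cuts = [-1] + [i for i in range(n) if y[i] == val_to_skip] + [n]
--     bounds = [(a + 1, b) for a, b in zip(cuts, cuts[1:]) if b - a > 1]
--     return [[x[a:b] for a, b in bounds], [y[a:b] for a, b in bounds]]
-- ===== Notes on version B (the rewrite author's own statement) =====
-- stated objective: alternative
-- what changed: Replaces A's single pass with mutable current-segment buffers and flush logic by a staged index computation: first collect the cut positions where y equals val_to_skip, then slice x and y between consecutive cuts, keeping only nonempty intervals; no segment is ever built element by element.
import Mathlib
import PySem

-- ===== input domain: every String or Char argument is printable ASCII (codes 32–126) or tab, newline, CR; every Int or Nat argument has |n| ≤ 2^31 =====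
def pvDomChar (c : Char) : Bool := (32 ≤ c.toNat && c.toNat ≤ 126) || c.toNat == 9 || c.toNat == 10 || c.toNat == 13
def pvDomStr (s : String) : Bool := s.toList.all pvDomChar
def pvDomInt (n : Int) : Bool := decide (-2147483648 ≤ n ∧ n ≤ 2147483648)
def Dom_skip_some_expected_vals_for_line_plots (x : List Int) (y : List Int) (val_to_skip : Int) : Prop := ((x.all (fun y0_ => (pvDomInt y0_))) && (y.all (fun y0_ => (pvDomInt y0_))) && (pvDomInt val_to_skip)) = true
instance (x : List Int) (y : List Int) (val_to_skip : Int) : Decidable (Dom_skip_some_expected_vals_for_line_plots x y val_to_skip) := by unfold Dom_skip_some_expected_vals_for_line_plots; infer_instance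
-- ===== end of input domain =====

-- B replaces A's single pass with mutable current-segment buffers and flush logic by a
-- staged computation: first collect the cut indices where y equals val_to_skip, then slice
-- x and y between consecutive cuts, keeping the nonempty intervals (alternative).

-- ===== PORT A =====
-- one iteration of A's for-loop; state = (x_segments, y_segments, current_segment_x, current_segment_y)
def pvStepA (val_to_skip : Int)
    (s : List (List Int) × List (List Int) × List Int × List Int) (p : Int × Int) :
    List (List Int) × List (List Int) × List Int × List Int :=
  if p.2 != val_to_skip then
    (s.1, s.2.1, s.2.2.1 ++ [p.1], s.2.2.2 ++ [p.2])
  else if s.2.2.1 ≠ [] then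
    (s.1 ++ [s.2.2.1], s.2.1 ++ [s.2.2.2], [], [])
  else
    (s.1, s.2.1, [], [])

def skip_some_expected_vals_for_line_plots (x : List Int) (y : List Int) (val_to_skip : Int) : List (List (List Int)) :=
  let st := (x.zip y).foldl (pvStepA val_to_skip) ([], [], [], [])
  if st.2.2.1 ≠ [] then [st.1 ++ [st.2.2.1], st.2.1 ++ [st.2.2.2]]
  else [st.1, st.2.1]

-- ===== PORT B =====
-- n = min(len(x), len(y)); cuts = [-1] + [i for i in range(n) if y[i] == val_to_skip] + [n];
-- bounds = [(a+1, b) for a, b in zip(cuts, cuts[1:]) if b - a > 1]; then slices of x and y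
def skip_some_expected_vals_for_line_plots_alt (x : List Int) (y : List Int) (val_to_skip : Int) : List (List (List Int)) :=
  let n : Int := min (x.length : Int) (y.length : Int)
  let cuts : List Int :=
    -1 :: ((PySem.List.pyRange 0 n 1).filter (fun i => PySem.List.pyGet? y i == some val_to_skip) ++ [n])
  let bounds : List (Int × Int) :=
    ((cuts.zip (PySem.List.slice cuts (some 1) none)).filter (fun ab => ab.2 - ab.1 > 1)).map
      (fun ab => (ab.1 + 1, ab.2))
  [bounds.map (fun ab => PySem.List.slice x (some ab.1) (some ab.2)),
   bounds.map (fun ab => PySem.List.slice y (some ab.1) (some ab.2))]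

-- ===== PRECONDITION & SPEC =====
def Spec_skip_some_expected_vals_for_line_plots (x : List Int) (y : List Int) (val_to_skip : Int) (out : List (List (List Int))) : Prop := out = skip_some_expected_vals_for_line_plots_alt x y val_to_skip
instance (x : List Int) (y : List Int) (val_to_skip : Int) (out : List (List (List Int))) : Decidable (Spec_skip_some_expected_vals_for_line_plots x y val_to_skip out) := by unfold Spec_skip_some_expected_vals_for_line_plots; infer_instance

-- ===== CLAIM (what is proved, stated in full; the proofs are below) =====
def Claim_equal_skip_some_expected_vals_for_line_plots : Prop := ∀ (x : List Int) (y : List Int) (val_to_skip : Int), Dom_skip_some_expected_vals_for_line_plots x y val_to_skip → Spec_skip_some_expected_vals_for_line_plots x y val_to_skip (skip_some_expected_vals_for_line_plots x y val_to_skip)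

-- ===== LEMMAS AND PROOFS =====

-- canonical middle form: a groupby of the zipped pair list on "kept or skipped"
def pvGroupby (val_to_skip : Int) : List (Int × Int) → List (Bool × List (Int × Int))
  | [] => []
  | p :: ps =>
    let k := p.2 != val_to_skip
    match pvGroupby val_to_skip ps with
    | [] => [(k, [p])]
    | (k', g) :: rest =>
      if k = k' then (k, p :: g) :: rest else (k, [p]) :: (k', g) :: rest

def pvSx (gl : List (Bool × List (Int × Int))) : List (List Int) :=
  (gl.filter (fun g => g.1)).map (fun g => g.2.map (fun p => p.1))
def pvSy (gl : List (Bool × List (Int × Int))) : List (List Int) :=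
  (gl.filter (fun g => g.1)).map (fun g => g.2.map (fun p => p.2))

-- the kept runs, as pair lists
def pvK (v : Int) (l : List (Int × Int)) : List (List (Int × Int)) :=
  ((pvGroupby v l).filter (fun g => g.1)).map (fun g => g.2)

-- ---------- A-side: fold invariant relating A's loop to the groupby runs ----------

-- what A's pending segment (cx, cy) contributes, given the groups of the remaining input
def pvPend (cx cy : List Int) (gl : List (Bool × List (Int × Int))) :
    List (List Int) × List (List Int) :=
  match cx, gl with
  | [], gl => (pvSx gl, pvSy gl)
  | _ :: _, (true, g) :: rest =>
      ((cx ++ g.map (fun p => p.1)) :: pvSx rest, (cy ++ g.map (fun p => p.2)) :: pvSy rest)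
  | _ :: _, gl => (cx :: pvSx gl, cy :: pvSy gl)

lemma pvPend_keep (v : Int) (p : Int × Int) (ps : List (Int × Int)) (cx cy : List Int)
    (h : (p.2 != v) = true) (hnil : cx = [] → cy = []) :
    pvPend cx cy (pvGroupby v (p :: ps)) = pvPend (cx ++ [p.1]) (cy ++ [p.2]) (pvGroupby v ps) := by
  rcases cx with _ | ⟨a, cx'⟩
  · have : cy = [] := hnil rfl
    subst this
    simp only [pvGroupby, h]
    rcases hg : pvGroupby v ps with _ | ⟨⟨k', g⟩, rest⟩
    · simp [pvPend, pvSx, pvSy]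
    · cases k' <;> simp [pvPend, pvSx, pvSy]
  · simp only [pvGroupby, h]
    rcases hg : pvGroupby v ps with _ | ⟨⟨k', g⟩, rest⟩
    · simp [pvPend, pvSx, pvSy]
    · cases k' <;> simp [pvPend, pvSx, pvSy]

lemma pvSx_skip (v : Int) (p : Int × Int) (ps : List (Int × Int)) (h : (p.2 != v) = false) :
    pvSx (pvGroupby v (p :: ps)) = pvSx (pvGroupby v ps) := by
  simp only [pvGroupby, h]
  rcases hg : pvGroupby v ps with _ | ⟨⟨k', g⟩, rest⟩
  · simp [pvSx]
  · cases k' <;> simp [pvSx]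

lemma pvSy_skip (v : Int) (p : Int × Int) (ps : List (Int × Int)) (h : (p.2 != v) = false) :
    pvSy (pvGroupby v (p :: ps)) = pvSy (pvGroupby v ps) := by
  simp only [pvGroupby, h]
  rcases hg : pvGroupby v ps with _ | ⟨⟨k', g⟩, rest⟩
  · simp [pvSy]
  · cases k' <;> simp [pvSy]

lemma pvPend_skip_ne (v : Int) (p : Int × Int) (ps : List (Int × Int)) (cx cy : List Int)
    (h : (p.2 != v) = false) (hcx : cx ≠ []) :
    pvPend cx cy (pvGroupby v (p :: ps)) =
      (cx :: pvSx (pvGroupby v ps), cy :: pvSy (pvGroupby v ps)) := by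
  rcases cx with _ | ⟨a, cx'⟩
  · exact absurd rfl hcx
  · have hx := pvSx_skip v p ps h
    have hy := pvSy_skip v p ps h
    simp only [pvGroupby, h] at hx hy ⊢
    rcases hg : pvGroupby v ps with _ | ⟨⟨k', g⟩, rest⟩ <;> simp only [hg] at hx hy ⊢
    · simp [pvPend, hx, hy]
    · cases k' <;> simp_all [pvPend]

-- main invariant: running A's loop from any state, then flushing, appends pvPend of the groups
lemma pvLoopA (v : Int) : ∀ (l : List (Int × Int)) (xs ys : List (List Int)) (cx cy : List Int),
    (cx = [] → cy = []) →
    (let st := l.foldl (pvStepA v) (xs, ys, cx, cy)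
     if st.2.2.1 ≠ [] then (st.1 ++ [st.2.2.1], st.2.1 ++ [st.2.2.2]) else (st.1, st.2.1))
    = (xs ++ (pvPend cx cy (pvGroupby v l)).1, ys ++ (pvPend cx cy (pvGroupby v l)).2) := by
  intro l
  induction l with
  | nil =>
    intro xs ys cx cy hnil
    rcases cx with _ | ⟨a, cx'⟩
    · simp [hnil rfl, pvGroupby, pvPend, pvSx, pvSy]
    · simp [pvGroupby, pvPend, pvSx, pvSy]
  | cons p ps ih =>
    intro xs ys cx cy hnil
    by_cases h : (p.2 != v) = true
    · have hstep : pvStepA v (xs, ys, cx, cy) p = (xs, ys, cx ++ [p.1], cy ++ [p.2]) := by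
        simp [pvStepA, h]
      rw [List.foldl_cons, hstep, ih xs ys (cx ++ [p.1]) (cy ++ [p.2]) (by simp),
        pvPend_keep v p ps cx cy h hnil]
    · have h' : (p.2 != v) = false := by simpa using h
      by_cases hcx : cx = []
      · have hstep : pvStepA v (xs, ys, cx, cy) p = (xs, ys, [], []) := by
          simp [pvStepA, h', hcx]
        rw [List.foldl_cons, hstep, ih xs ys [] [] (fun _ => rfl)]
        subst hcx
        simp [pvPend, pvSx_skip v p ps h', pvSy_skip v p ps h']
      · have hstep : pvStepA v (xs, ys, cx, cy) p = (xs ++ [cx], ys ++ [cy], [], []) := by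
          simp [pvStepA, h', hcx]
        rw [List.foldl_cons, hstep, ih (xs ++ [cx]) (ys ++ [cy]) [] [] (fun _ => rfl),
          pvPend_skip_ne v p ps cx cy h' hcx]
        simp [pvPend]

lemma pvA_eq (x y : List Int) (v : Int) :
    skip_some_expected_vals_for_line_plots x y v
      = [pvSx (pvGroupby v (x.zip y)), pvSy (pvGroupby v (x.zip y))] := by
  have h := pvLoopA v (x.zip y) [] [] [] [] (fun _ => rfl)
  simp only [pvPend] at h
  simp only [skip_some_expected_vals_for_line_plots]
  rcases hst : (x.zip y).foldl (pvStepA v) ([], [], [], []) with ⟨a, b, c, d⟩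
  simp only [hst, List.nil_append] at h
  by_cases hc : c = [] <;> simp_all

-- ---------- B-side: cut indices, interval bounds, and slices ----------

-- 0-based positions of the skipped values in the pair list
def pvIdxs (v : Int) : List (Int × Int) → List Nat
  | [] => []
  | p :: ps => if p.2 == v then 0 :: (pvIdxs v ps).map (· + 1) else (pvIdxs v ps).map (· + 1)

-- the adjacent-pair scan over (-1 :: cut list): (a+1, b) bounds of the nonempty intervals
def pvBnds : Int → List Nat → List (Nat × Nat)
  | _, [] => []
  | a, b :: I => (if (b : Int) - a > 1 then [((a + 1).toNat, b)] else []) ++ pvBnds (b : Int) I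

lemma pvIdxs_lt (v : Int) : ∀ (l : List (Int × Int)), ∀ k ∈ pvIdxs v l, k < l.length := by
  intro l
  induction l with
  | nil => simp [pvIdxs]
  | cons p ps ih =>
    intro k hk
    simp only [pvIdxs] at hk
    split_ifs at hk with h
    · rcases List.mem_cons.1 hk with rfl | hk'
      · simp
      · obtain ⟨j, hj, rfl⟩ := List.mem_map.1 hk'
        have := ih j hj
        simp
        omega
    · obtain ⟨j, hj, rfl⟩ := List.mem_map.1 hk
      have := ih j hj
      simp
      omega

-- the range/filter comprehension computes exactly pvIdxs of the zip
lemma pvFilterRange (v : Int) : ∀ (x y : List Int),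
    (List.range (min x.length y.length)).filter (fun k => y[k]? == some v) = pvIdxs v (x.zip y) := by
  intro x
  induction x with
  | nil => intro y; simp [pvIdxs]
  | cons a x' ih =>
    intro y
    cases y with
    | nil => simp [pvIdxs]
    | cons b y' =>
      simp only [List.length_cons, Nat.succ_min_succ, List.range_succ_eq_map, List.zip_cons_cons,
        pvIdxs, List.filter_cons, List.filter_map]
      have hcomp : ((fun k : Nat => ((b :: y')[k]? == some v)) ∘ Nat.succ)
          = (fun k : Nat => (y'[k]? == some v)) := by
        funext k; simp
      rw [hcomp, ih y']
      by_cases hb : (b == v) = true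
      · simp [hb]
      · simp [hb]

lemma pvBnds_shift : ∀ (I : List Nat) (a : Int), -1 ≤ a →
    pvBnds (a + 1) (I.map (· + 1)) = (pvBnds a I).map (fun ab => (ab.1 + 1, ab.2 + 1)) := by
  intro I
  induction I with
  | nil => intro a _; simp [pvBnds]
  | cons b I ih =>
    intro a ha
    simp only [List.map_cons, pvBnds, List.map_append]
    have h1 : ((b + 1 : Nat) : Int) - (a + 1) = (b : Int) - a := by push_cast; ring
    rw [h1]
    have h2 : ((b + 1 : Nat) : Int) = (b : Int) + 1 := by push_cast; ring
    rw [h2, ih (b : Int) (by omega)]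
    split_ifs with h
    · simp only [List.map_cons, List.map_nil, List.cons_append, List.nil_append]
      congr 2
      omega
    · simp

-- the zip(cuts, cuts[1:]) comprehension computes the pvBnds scan
lemma pvPairs : ∀ (I : List Nat) (a : Int), -1 ≤ a →
    (((a :: I.map (fun k : Nat => (k : Int))).zip (I.map (fun k : Nat => (k : Int)))).filter
        (fun ab => ab.2 - ab.1 > 1)).map (fun ab => (ab.1 + 1, ab.2))
      = (pvBnds a I).map (fun ab => ((ab.1 : Int), (ab.2 : Int))) := by
  intro I
  induction I with
  | nil => intro a _; simp [pvBnds]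
  | cons b I ih =>
    intro a ha
    simp only [List.map_cons, List.zip_cons_cons, List.filter_cons, pvBnds, List.map_append]
    rw [← ih (b : Int) (by omega)]
    by_cases h : (1 : Int) < (b : Int) - a
    · have hcast : (((a + 1).toNat : Nat) : Int) = a + 1 := by omega
      simp [h, hcast]
    · simp [h]

lemma pvBnds_mem (N : Nat) : ∀ (I : List Nat), (∀ b ∈ I, b ≤ N) → ∀ (a : Int), -1 ≤ a →
    ∀ ab ∈ pvBnds a I, ab.1 ≤ ab.2 ∧ ab.2 ≤ N := by
  intro I
  induction I with
  | nil => intro _ a _ ab hab; simp [pvBnds] at hab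
  | cons b I ih =>
    intro hI a ha ab hab
    simp only [pvBnds, List.mem_append] at hab
    rcases hab with hab | hab
    · split_ifs at hab with h
      · simp only [List.mem_singleton] at hab
        subst hab
        constructor
        · simp
          omega
        · simpa using hI b (by simp)
      · simp at hab
    · exact ih (fun c hc => hI c (by simp [hc])) (b : Int) (by omega) ab hab

-- one unfolding of pvGroupby, kept as an equation so the inner call stays folded
lemma pvGroupby_cons_eq (v : Int) (p : Int × Int) (ps : List (Int × Int)) :
    pvGroupby v (p :: ps) = match pvGroupby v ps with
      | [] => [((p.2 != v), [p])]
      | (k', g) :: rest =>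
        if (p.2 != v) = k' then ((p.2 != v), p :: g) :: rest
        else ((p.2 != v), [p]) :: (k', g) :: rest := rfl

lemma pvGroupby_cons (v : Int) (q : Int × Int) (qs : List (Int × Int)) :
    ∃ g rest, pvGroupby v (q :: qs) = ((q.2 != v), q :: g) :: rest := by
  rw [pvGroupby_cons_eq]
  rcases pvGroupby v qs with _ | ⟨⟨k', g⟩, r⟩
  · exact ⟨[], [], rfl⟩
  · by_cases h : (q.2 != v) = k'
    · exact ⟨g, r, by simp [h]⟩
    · exact ⟨[], (k', g) :: r, by simp [h]⟩

lemma pvK_skip (v : Int) (p : Int × Int) (ps : List (Int × Int)) (h : (p.2 != v) = false) :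
    pvK v (p :: ps) = pvK v ps := by
  simp only [pvK, pvGroupby_cons_eq v p ps, h]
  rcases pvGroupby v ps with _ | ⟨⟨k', g⟩, r⟩
  · simp
  · cases k' <;> simp

lemma pvK_cons_nil (v : Int) (p : Int × Int) (h : (p.2 != v) = true) :
    pvK v [p] = [[p]] := by
  simp [pvK, pvGroupby, h]

lemma pvK_cons_skiphead (v : Int) (p q : Int × Int) (qs : List (Int × Int))
    (h : (p.2 != v) = true) (hq : (q.2 != v) = false) :
    pvK v (p :: q :: qs) = [p] :: pvK v (q :: qs) := by
  obtain ⟨g, rest, hg⟩ := pvGroupby_cons v q qs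
  rw [hq] at hg
  simp only [pvK, pvGroupby_cons_eq v p (q :: qs), hg, h]
  simp

lemma pvK_cons_merge (v : Int) (p q : Int × Int) (qs : List (Int × Int))
    (h : (p.2 != v) = true) (hq : (q.2 != v) = true) :
    ∃ g R, pvK v (q :: qs) = (q :: g) :: R ∧ pvK v (p :: q :: qs) = (p :: q :: g) :: R := by
  obtain ⟨g, rest, hg⟩ := pvGroupby_cons v q qs
  rw [hq] at hg
  refine ⟨g, (rest.filter (fun g => g.1)).map (fun g => g.2), ?_, ?_⟩
  · simp [pvK, hg]
  · simp only [pvK, pvGroupby_cons_eq v p (q :: qs), hg, h]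
    simp

-- the heart: the bounds scan over the cut list slices the pair list into its kept runs
lemma pvMain (v : Int) : ∀ (l : List (Int × Int)),
    (pvBnds (-1) (pvIdxs v l ++ [l.length])).map
        (fun ab => (l.drop ab.1).take (ab.2 - ab.1)) = pvK v l := by
  intro l
  induction l with
  | nil => simp [pvIdxs, pvBnds, pvK, pvGroupby]
  | cons p ps ih =>
    by_cases hv : (p.2 == v) = true
    · have h' : (p.2 != v) = false := by simp [bne, hv]
      have harg : pvIdxs v (p :: ps) ++ [(p :: ps).length]
          = 0 :: ((pvIdxs v ps ++ [ps.length]).map (· + 1)) := by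
        simp [pvIdxs, hv, List.map_append]
      rw [harg]
      have h0 : pvBnds (-1) (0 :: ((pvIdxs v ps ++ [ps.length]).map (· + 1)))
          = (pvBnds (-1) (pvIdxs v ps ++ [ps.length])).map (fun ab => (ab.1 + 1, ab.2 + 1)) := by
        simp only [pvBnds]
        norm_num
        simpa using pvBnds_shift (pvIdxs v ps ++ [ps.length]) (-1) (by norm_num)
      rw [h0, List.map_map]
      have hfun : ((fun ab : Nat × Nat => ((p :: ps).drop ab.1).take (ab.2 - ab.1)) ∘
          (fun ab : Nat × Nat => (ab.1 + 1, ab.2 + 1)))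
          = fun ab : Nat × Nat => (ps.drop ab.1).take (ab.2 - ab.1) := by
        funext ab; simp
      rw [hfun, ih, pvK_skip v p ps h']
    · have h : (p.2 != v) = true := by simp [bne]; simpa using hv
      cases ps with
      | nil =>
        have hne : ¬ (p.2 = v) := by simpa using hv
        rw [pvK_cons_nil v p h]
        norm_num [pvIdxs, hne, pvBnds]
      | cons q qs =>
        by_cases hqv : (q.2 == v) = true
        · have hq : (q.2 != v) = false := by simp [bne, hqv]
          have harg : pvIdxs v (p :: q :: qs) ++ [(p :: q :: qs).length]
              = 1 :: (((pvIdxs v qs).map (· + 1) ++ [(q :: qs).length]).map (· + 1)) := by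
            simp [pvIdxs, hv, hqv, List.map_append]
          rw [harg]
          set J : List Nat := (pvIdxs v qs).map (· + 1) ++ [(q :: qs).length] with hJ
          have hIps : pvIdxs v (q :: qs) ++ [(q :: qs).length] = 0 :: J := by
            simp [pvIdxs, hqv, hJ]
          have h1 : pvBnds (-1) ((1 : Nat) :: J.map (· + 1))
              = (0, 1) :: (pvBnds 0 J).map (fun ab => (ab.1 + 1, ab.2 + 1)) := by
            simp only [pvBnds]
            norm_num
            simpa using pvBnds_shift J 0 (by norm_num)
          rw [h1]
          have hIH : (pvBnds 0 J).map (fun ab => ((q :: qs).drop ab.1).take (ab.2 - ab.1))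
              = pvK v (q :: qs) := by
            rw [← ih, hIps]
            simp only [pvBnds]
            norm_num
          simp only [List.map_cons, List.map_map]
          have hfun : ((fun ab : Nat × Nat => ((p :: q :: qs).drop ab.1).take (ab.2 - ab.1)) ∘
              (fun ab : Nat × Nat => (ab.1 + 1, ab.2 + 1)))
              = fun ab : Nat × Nat => ((q :: qs).drop ab.1).take (ab.2 - ab.1) := by
            funext ab; simp
          rw [hfun, hIH, pvK_cons_skiphead v p q qs h hq]
          rfl
        · have hq : (q.2 != v) = true := by simp [bne]; simpa using hqv
          obtain ⟨g, R, hKps, hKl⟩ := pvK_cons_merge v p q qs h hq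
          rcases hJ0 : pvIdxs v qs ++ [qs.length] with _ | ⟨c0, J0'⟩
          · simp at hJ0
          · have harg : pvIdxs v (p :: q :: qs) ++ [(p :: q :: qs).length]
                = ((c0 :: J0').map (· + 1)).map (· + 1) := by
              simp only [pvIdxs, hv, hqv, List.length_cons]
              rw [← hJ0]
              simp [List.map_append]
            have hargps : pvIdxs v (q :: qs) ++ [(q :: qs).length]
                = (c0 :: J0').map (· + 1) := by
              simp only [pvIdxs, List.length_cons]
              rw [if_neg (by simpa using hqv), ← hJ0]
              simp [List.map_append]
            rw [harg]
            have hL : pvBnds (-1) (((c0 :: J0').map (· + 1)).map (· + 1))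
                = (0, c0 + 2) :: (pvBnds ((c0 : Int) + 1) (J0'.map (· + 1))).map
                    (fun ab => (ab.1 + 1, ab.2 + 1)) := by
              simp only [List.map_cons, pvBnds]
              have hc : ((c0 + 1 + 1 : Nat) : Int) - (-1) > 1 := by push_cast; omega
              rw [if_pos hc]
              have hsh := pvBnds_shift (J0'.map (· + 1)) ((c0 : Int) + 1) (by omega)
              have hcst : ((c0 + 1 + 1 : Nat) : Int) = (c0 : Int) + 1 + 1 := by push_cast; ring
              rw [hcst, hsh]
              norm_num
            rw [hL]
            have hR : pvBnds (-1) ((c0 :: J0').map (· + 1))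
                = (0, c0 + 1) :: pvBnds ((c0 : Int) + 1) (J0'.map (· + 1)) := by
              simp only [List.map_cons, pvBnds]
              have hc : ((c0 + 1 : Nat) : Int) - (-1) > 1 := by push_cast; omega
              rw [if_pos hc]
              have hcst : ((c0 + 1 : Nat) : Int) = (c0 : Int) + 1 := by push_cast; ring
              rw [hcst]
              norm_num
            have hIH2 : ((q :: qs).take (c0 + 1)) ::
                (pvBnds ((c0 : Int) + 1) (J0'.map (· + 1))).map
                  (fun ab => ((q :: qs).drop ab.1).take (ab.2 - ab.1))
                = (q :: g) :: R := by
              rw [← hKps, ← ih, hargps, hR]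
              simp
            have htake : (q :: qs).take (c0 + 1) = q :: g := (List.cons.injEq _ _ _ _ ▸ hIH2).1
            have htail : (pvBnds ((c0 : Int) + 1) (J0'.map (· + 1))).map
                  (fun ab => ((q :: qs).drop ab.1).take (ab.2 - ab.1)) = R :=
              (List.cons.injEq _ _ _ _ ▸ hIH2).2
            rw [hKl]
            simp only [List.map_cons, List.map_map]
            congr 1
            · show ((p :: q :: qs).drop 0).take (c0 + 2 - 0) = p :: q :: g
              simp only [List.drop_zero, Nat.sub_zero]
              rw [show c0 + 2 = (c0 + 1) + 1 from rfl, List.take_succ_cons, htake]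
            · rw [← htail]
              congr 1
              funext ab
              simp

-- ---------- extraction of the x- and y-rows from the pair slices ----------

lemma pvZipDrop (x y : List Int) (n : Nat) : (x.zip y).drop n = (x.drop n).zip (y.drop n) := by
  induction n generalizing x y with
  | zero => simp
  | succ k ih => cases x <;> cases y <;> simp [ih]

lemma pvZipTake (x y : List Int) (n : Nat) : (x.zip y).take n = (x.take n).zip (y.take n) := by
  induction n generalizing x y with
  | zero => simp
  | succ k ih => cases x <;> cases y <;> simp [ih]

lemma pvSliceFst (x y : List Int) (a b : Nat) (hy : b ≤ y.length) :
    (((x.zip y).drop a).take (b - a)).map Prod.fst = (x.drop a).take (b - a) := by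
  rw [pvZipDrop, pvZipTake, List.map_fst_zip]
  simp only [List.length_take, List.length_drop]
  omega

lemma pvSliceSnd (x y : List Int) (a b : Nat) (hx : b ≤ x.length) :
    (((x.zip y).drop a).take (b - a)).map Prod.snd = (y.drop a).take (b - a) := by
  rw [pvZipDrop, pvZipTake, List.map_snd_zip]
  simp only [List.length_take, List.length_drop]
  omega

-- ---------- assembling B ----------

lemma pvB_eq (x y : List Int) (v : Int) :
    skip_some_expected_vals_for_line_plots_alt x y v
      = [pvSx (pvGroupby v (x.zip y)), pvSy (pvGroupby v (x.zip y))] := by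
  have hlen : (x.zip y).length = min x.length y.length := List.length_zip
  have hn : min ((x.length : Int)) ((y.length : Int)) = (((x.zip y).length : Nat) : Int) := by
    rw [hlen]
    push_cast
    rfl
  have hfilter : (PySem.List.pyRange 0 (min ((x.length : Int)) ((y.length : Int))) 1).filter
        (fun i => PySem.List.pyGet? y i == some v)
      = (pvIdxs v (x.zip y)).map (fun k : Nat => (k : Int)) := by
    rw [hn, PySem.List.pyRange_zero_natCast, List.filter_map]
    have hpred : ((fun i => PySem.List.pyGet? y i == some v) ∘ (fun k : Nat => (k : Int)))
        = fun k : Nat => (y[k]? == some v) := by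
      funext k
      simp [PySem.List.pyGet?_natCast]
    rw [hpred, hlen, pvFilterRange v x y]
  have hmem : ∀ ab ∈ pvBnds (-1) (pvIdxs v (x.zip y) ++ [(x.zip y).length]),
      ab.1 ≤ ab.2 ∧ ab.2 ≤ (x.zip y).length := by
    apply pvBnds_mem ((x.zip y).length) _ _ (-1) (by norm_num)
    intro b hb
    rcases List.mem_append.1 hb with hb | hb
    · exact le_of_lt (pvIdxs_lt v (x.zip y) b hb)
    · simp only [List.mem_singleton] at hb
      omega
  have hcuts : (pvIdxs v (x.zip y)).map (fun k : Nat => (k : Int)) ++ [(((x.zip y).length : Nat) : Int)]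
      = (pvIdxs v (x.zip y) ++ [(x.zip y).length]).map (fun k : Nat => (k : Int)) := by
    simp [List.map_append]
  simp only [skip_some_expected_vals_for_line_plots_alt, PySem.List.slice_from_one,
    List.tail_cons]
  rw [hfilter, hn, hcuts, pvPairs (pvIdxs v (x.zip y) ++ [(x.zip y).length]) (-1) (by norm_num)]
  congr 1
  · rw [List.map_map]
    have hx : ((fun ab : Int × Int => PySem.List.slice x (some ab.1) (some ab.2)) ∘
        (fun ab : Nat × Nat => ((ab.1 : Int), (ab.2 : Int))))
        = fun ab : Nat × Nat => (x.drop ab.1).take (ab.2 - ab.1) := by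
      funext ab
      exact PySem.List.slice_natCast x ab.1 ab.2
    rw [hx]
    calc (pvBnds (-1) (pvIdxs v (x.zip y) ++ [(x.zip y).length])).map
          (fun ab => (x.drop ab.1).take (ab.2 - ab.1))
        = (pvBnds (-1) (pvIdxs v (x.zip y) ++ [(x.zip y).length])).map
          (fun ab => (((x.zip y).drop ab.1).take (ab.2 - ab.1)).map Prod.fst) := by
          apply List.map_congr_left
          intro ab hab
          rw [pvSliceFst x y ab.1 ab.2 (by have := (hmem ab hab).2; omega)]
      _ = ((pvBnds (-1) (pvIdxs v (x.zip y) ++ [(x.zip y).length])).map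
          (fun ab => ((x.zip y).drop ab.1).take (ab.2 - ab.1))).map (List.map Prod.fst) := by
          rw [List.map_map]
          rfl
      _ = (pvK v (x.zip y)).map (List.map Prod.fst) := by rw [pvMain v (x.zip y)]
      _ = pvSx (pvGroupby v (x.zip y)) := by
          simp [pvK, pvSx, List.map_map]
  · simp only [List.cons.injEq, and_true]
    rw [List.map_map]
    have hy : ((fun ab : Int × Int => PySem.List.slice y (some ab.1) (some ab.2)) ∘
        (fun ab : Nat × Nat => ((ab.1 : Int), (ab.2 : Int))))
        = fun ab : Nat × Nat => (y.drop ab.1).take (ab.2 - ab.1) := by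
      funext ab
      exact PySem.List.slice_natCast y ab.1 ab.2
    rw [hy]
    calc (pvBnds (-1) (pvIdxs v (x.zip y) ++ [(x.zip y).length])).map
          (fun ab => (y.drop ab.1).take (ab.2 - ab.1))
        = (pvBnds (-1) (pvIdxs v (x.zip y) ++ [(x.zip y).length])).map
          (fun ab => (((x.zip y).drop ab.1).take (ab.2 - ab.1)).map Prod.snd) := by
          apply List.map_congr_left
          intro ab hab
          rw [pvSliceSnd x y ab.1 ab.2 (by have := (hmem ab hab).2; omega)]
      _ = ((pvBnds (-1) (pvIdxs v (x.zip y) ++ [(x.zip y).length])).map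
          (fun ab => ((x.zip y).drop ab.1).take (ab.2 - ab.1))).map (List.map Prod.snd) := by
          rw [List.map_map]
          rfl
      _ = (pvK v (x.zip y)).map (List.map Prod.snd) := by rw [pvMain v (x.zip y)]
      _ = pvSy (pvGroupby v (x.zip y)) := by
          simp [pvK, pvSy, List.map_map]

-- ===== VERDICT (by name: the statement is the Claim_ definition above) =====
theorem skip_some_expected_vals_for_line_plots_spec : Claim_equal_skip_some_expected_vals_for_line_plots := by
  intro x y v _
  show _ = _
  rw [pvA_eq, pvB_eq]
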